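-- pv_equiv track=rewrite | github.com/ShivaNathaniel/SHA-512 | SHA-512-main/Hash function/SHA512/SHA512.py | not1
-- ===== SOURCE A (Python) =====
-- def hex_to_bin(s):
--     trans = {
--         "0": "0000",
--         "1": "0001",
--         "2": "0010",
--         "3": "0011",
--         "4": "0100",
--         "5": "0101",
--         "6": "0110",
--         "7": "0111",
--         "8": "1000",
--         "9": "1001",
--         "A": "1010",
--         "B": "1011",
--         "C": "1100",
--         "D": "1101",
--         "E": "1110",
--         "F": "1111"}
--     binary = ""
--     for i in range(len(s)):
--         binary = binary + trans[s[i]]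
--     return binary
--
-- def bin_to_hex(s):
--     trans = {
--         "0000": "0",
--         "0001": "1",
--         "0010": "2",
--         "0011": "3",
--         "0100": "4",
--         "0101": "5",
--         "0110": "6",
--         "0111": "7",
--         "1000": "8",
--         "1001": "9",
--         "1010": "A",
--         "1011": "B",
--         "1100": "C",
--         "1101": "D",
--         "1110": "E",
--         "1111": "F"}
--     hexa = ""
--     for i in range(0, len(s), 4):
--         ch = ""
--         ch += s[i]              #chuyển từng 4bit thành 1 số hexa
--         ch += s[i+1]
--         ch += s[i+2]
--         ch += s[i+3]
--         hexa = hexa + trans[ch]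
--     return hexa
--
-- def not1(s):
--     s = hex_to_bin(s)
--     c = ''
--     for i in range(len(s)):
--         if s[i] == '0':             #đảo ngược giá trị bit: '1' chuyển thành '0'; '0' thành '1'
--             c +='1'
--         else: c+= '0'
--     c = bin_to_hex(c)
--     return c
-- ===== SOURCE B (Python) =====
-- _COMPL = {"0": "F", "1": "E", "2": "D", "3": "C", "4": "B", "5": "A",
--           "6": "9", "7": "8", "8": "7", "9": "6", "A": "5", "B": "4",
--           "C": "3", "D": "2", "E": "1", "F": "0"}
--
-- def not1(s):
--     return "".join(_COMPL[ch] for ch in s)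
-- ===== Notes on version B (the rewrite author's own statement) =====
-- stated objective: simpler
-- what changed: B replaces A's three passes (hex->binary expansion, per-bit inversion, binary->hex regrouping) with a single pass over the string through one hex-digit complement table.
import Mathlib
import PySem

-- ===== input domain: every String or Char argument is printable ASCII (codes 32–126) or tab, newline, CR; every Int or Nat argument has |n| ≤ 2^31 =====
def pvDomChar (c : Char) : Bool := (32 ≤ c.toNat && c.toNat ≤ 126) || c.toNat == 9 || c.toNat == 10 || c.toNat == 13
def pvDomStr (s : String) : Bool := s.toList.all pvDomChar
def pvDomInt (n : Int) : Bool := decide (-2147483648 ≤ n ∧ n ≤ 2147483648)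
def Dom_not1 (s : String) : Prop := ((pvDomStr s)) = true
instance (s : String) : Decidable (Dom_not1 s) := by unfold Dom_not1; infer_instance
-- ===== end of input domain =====

-- B is a one-pass lookup through a hex-complement table instead of A's three passes
-- (hex->binary, bit inversion, binary->hex). Equal on Pre_ (uppercase hex strings).

-- ===== PORT A =====
-- hex_to_bin's dict lookup; on a non-hex char Python raises KeyError (excluded by Pre_),
-- the port returns [] there.
def hexBinTrans (c : Char) : List Char :=
  if c = '0' then ['0','0','0','0'] else
  if c = '1' then ['0','0','0','1'] else
  if c = '2' then ['0','0','1','0'] else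
  if c = '3' then ['0','0','1','1'] else
  if c = '4' then ['0','1','0','0'] else
  if c = '5' then ['0','1','0','1'] else
  if c = '6' then ['0','1','1','0'] else
  if c = '7' then ['0','1','1','1'] else
  if c = '8' then ['1','0','0','0'] else
  if c = '9' then ['1','0','0','1'] else
  if c = 'A' then ['1','0','1','0'] else
  if c = 'B' then ['1','0','1','1'] else
  if c = 'C' then ['1','1','0','0'] else
  if c = 'D' then ['1','1','0','1'] else
  if c = 'E' then ['1','1','1','0'] else
  if c = 'F' then ['1','1','1','1'] else []

def hexToBin (l : List Char) : List Char :=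
  l.foldl (fun binary c => binary ++ hexBinTrans c) []

-- bin_to_hex's dict lookup on a 4-bit group; unknown group (KeyError, excluded) maps to [].
def binHexTrans (g : List Char) : List Char :=
  if g = ['0','0','0','0'] then ['0'] else
  if g = ['0','0','0','1'] then ['1'] else
  if g = ['0','0','1','0'] then ['2'] else
  if g = ['0','0','1','1'] then ['3'] else
  if g = ['0','1','0','0'] then ['4'] else
  if g = ['0','1','0','1'] then ['5'] else
  if g = ['0','1','1','0'] then ['6'] else
  if g = ['0','1','1','1'] then ['7'] else
  if g = ['1','0','0','0'] then ['8'] else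
  if g = ['1','0','0','1'] then ['9'] else
  if g = ['1','0','1','0'] then ['A'] else
  if g = ['1','0','1','1'] then ['B'] else
  if g = ['1','1','0','0'] then ['C'] else
  if g = ['1','1','0','1'] then ['D'] else
  if g = ['1','1','1','0'] then ['E'] else
  if g = ['1','1','1','1'] then ['F'] else []

-- bin_to_hex: consume 4 chars per step (Python's range(0, len, 4) with s[i..i+3];
-- a trailing group shorter than 4 would be IndexError in Python — excluded by Pre_).
def binToHex : List Char → List Char
  | a :: b :: c :: d :: rest => binHexTrans [a, b, c, d] ++ binToHex rest
  | _ => []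

def not1 (s : String) : String :=
  let bin := hexToBin s.toList
  let c := bin.foldl (fun acc ch => acc ++ [if ch = '0' then '1' else '0']) []
  String.mk (binToHex c)

-- ===== PORT B =====
def hexCompl (c : Char) : Char :=
  if c = '0' then 'F' else
  if c = '1' then 'E' else
  if c = '2' then 'D' else
  if c = '3' then 'C' else
  if c = '4' then 'B' else
  if c = '5' then 'A' else
  if c = '6' then '9' else
  if c = '7' then '8' else
  if c = '8' then '7' else
  if c = '9' then '6' else
  if c = 'A' then '5' else
  if c = 'B' then '4' else
  if c = 'C' then '3' else
  if c = 'D' then '2' else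
  if c = 'E' then '1' else
  if c = 'F' then '0' else c   -- non-hex char: Python B raises KeyError (excluded by Pre_)

def not1_alt (s : String) : String := String.mk (s.toList.map hexCompl)

-- ===== PRECONDITION & SPEC =====
-- Pre_: every character is an uppercase hex digit; on any other character both A and B
-- raise KeyError in Python.
def isHexDigit (c : Char) : Bool :=
  c == '0' || c == '1' || c == '2' || c == '3' || c == '4' || c == '5' ||
  c == '6' || c == '7' || c == '8' || c == '9' || c == 'A' || c == 'B' ||
  c == 'C' || c == 'D' || c == 'E' || c == 'F'

def Pre_not1 (s : String) : Prop := (s.toList.all isHexDigit) = true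
instance (s : String) : Decidable (Pre_not1 s) := by unfold Pre_not1; infer_instance

def pvWitness_not1 : String := "D3ADBEEF"

def Spec_not1 (s : String) (out : String) : Prop := out = not1_alt s
instance (s : String) (out : String) : Decidable (Spec_not1 s out) := by unfold Spec_not1; infer_instance

-- ===== CLAIM (what is proved, stated in full; the proofs are below) =====
def Claim_equal_not1 : Prop := ∀ (s : String), Dom_not1 s → Pre_not1 s → Spec_not1 s (not1 s)

-- ===== LEMMAS AND PROOFS =====

theorem hexToBin_eq_flatMap (l : List Char) : hexToBin l = l.flatMap hexBinTrans := by
  unfold hexToBin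
  simpa using PySem.List.foldl_append_eq_flatMap (l := l) (g := hexBinTrans) (acc := [])

theorem inv_loop_eq_map (l : List Char) (acc : List Char) :
    l.foldl (fun acc ch => acc ++ [if ch = '0' then '1' else '0']) acc
      = acc ++ l.map (fun ch => if ch = '0' then '1' else '0') :=
  PySem.List.foldl_append_singleton_eq_map ..

-- the core per-character fact: inverting the 4-bit expansion of a hex digit and
-- regrouping yields exactly that digit's complement
theorem binToHex_inv_hexBinTrans (c : Char) (hc : isHexDigit c = true)
    (rest : List Char) :
    binToHex ((hexBinTrans c).map (fun ch => if ch = '0' then '1' else '0') ++ rest)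
      = hexCompl c :: binToHex rest := by
  simp only [isHexDigit, Bool.or_eq_true, beq_iff_eq] at hc
  rcases hc with ((((((((((((((h|h)|h)|h)|h)|h)|h)|h)|h)|h)|h)|h)|h)|h)|h)|h <;>
    subst h <;> simp [hexBinTrans, binHexTrans, hexCompl, binToHex]

theorem not1_core (l : List Char) (h : l.all isHexDigit = true) :
    binToHex ((l.flatMap hexBinTrans).map (fun ch => if ch = '0' then '1' else '0'))
      = l.map hexCompl := by
  induction l with
  | nil => simp [binToHex]
  | cons c t ih =>
    simp only [List.all_cons, Bool.and_eq_true] at h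
    obtain ⟨hc, ht⟩ := h
    simp only [List.flatMap_cons, List.map_append, List.map_cons]
    rw [binToHex_inv_hexBinTrans c hc, ih ht]

-- ===== VERDICT (by name: the statement is the Claim_ definition above) =====
theorem not1_spec : Claim_equal_not1 := by
  intro s _ hpre
  unfold Spec_not1 not1 not1_alt
  simp only [hexToBin_eq_flatMap, inv_loop_eq_map, List.nil_append]
  rw [not1_core s.toList hpre]
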